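-- pv_equiv track=rewrite | github.com/Kianoosh76/DS-Course-Materials | 2_Sorting/Task6/task.py | func
-- ===== SOURCE A (Python) =====
-- def func(n , m , arr):
--     arr.sort()
--     c = 0
--     d = 0
--     s = sum(arr)
--     for i in range(n):
--         if (arr[i] > d):
--             d += 1
--     #c += (arr[n - 1] - d)
--     return s - arr[n - 1] - n + d
-- ===== SOURCE B (Python) =====
-- def func(n, m, arr):
--     arr.sort()
--     s = sum(arr)
--     d = 0
--     i = 0
--     while i < n:
--         v = arr[i]
--         j = i + 1
--         while j < n and arr[j] == v:
--             j += 1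
--         if v > d:
--             d += min(j - i, v - d)
--         i = j
--     return s - arr[n - 1] - n + d
-- ===== Notes on version B (the rewrite author's own statement) =====
-- stated objective: alternative
-- what changed: B replaces A's per-element running-counter pass over range(n) with a two-pointer walk over maximal runs of equal values in the sorted prefix, bumping the counter in bulk by min(run_length, v - d) per distinct value.
import Mathlib
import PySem

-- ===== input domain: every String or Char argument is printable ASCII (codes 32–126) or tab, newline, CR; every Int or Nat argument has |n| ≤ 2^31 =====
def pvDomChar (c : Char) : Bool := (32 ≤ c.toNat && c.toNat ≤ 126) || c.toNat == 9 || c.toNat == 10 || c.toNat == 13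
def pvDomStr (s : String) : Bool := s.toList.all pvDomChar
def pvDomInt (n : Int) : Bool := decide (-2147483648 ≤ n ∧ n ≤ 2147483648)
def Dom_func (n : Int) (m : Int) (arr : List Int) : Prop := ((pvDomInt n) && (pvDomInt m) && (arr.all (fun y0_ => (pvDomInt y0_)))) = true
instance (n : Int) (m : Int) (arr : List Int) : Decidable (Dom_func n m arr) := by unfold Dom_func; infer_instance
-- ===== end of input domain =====

-- B replaces A's per-element counter loop with a run-grouped two-pointer walk (bulk increments);
-- return values agree on Pre_; like A, B sorts arr in place (same observable mutation).

-- ===== PORT A =====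
def func (n : Int) (m : Int) (arr : List Int) : Int :=
  let a := PySem.List.sorted arr (fun x => x) false
  let s := a.sum
  let d := (PySem.List.pyRange 0 n 1).foldl
    (fun d i => if d < PySem.List.pyGetD a i 0 then d + 1 else d) 0
  s - PySem.List.pyGetD a (n - 1) 0 - n + d

-- ===== PORT B =====
-- inner while: advance j over the run of value v (j < n and a[j] == v)
def pvScanRun (a : List Int) (n : Int) (v : Int) (j : Int) : Int :=
  if h : j < n ∧ PySem.List.pyGetD a j 0 = v then pvScanRun a n v (j + 1) else j
termination_by (n - j).toNat
decreasing_by omega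

theorem pvScanRun_ge (a : List Int) (n : Int) (v : Int) (j : Int) : j ≤ pvScanRun a n v j := by
  fun_induction pvScanRun a n v j with
  | case1 j h ih => omega
  | case2 j h => omega

-- outer while over i < n, one step per run
def pvClimb (a : List Int) (n : Int) (i : Int) (d : Int) : Int :=
  if h : i < n then
    let v := PySem.List.pyGetD a i 0
    let j := pvScanRun a n v (i + 1)
    pvClimb a n j (if d < v then d + min (j - i) (v - d) else d)
  else d
termination_by (n - i).toNat
decreasing_by have := pvScanRun_ge a n (PySem.List.pyGetD a i 0) (i + 1); omega

def func_alt (n : Int) (m : Int) (arr : List Int) : Int :=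
  let a := PySem.List.sorted arr (fun x => x) false
  let s := a.sum
  let d := pvClimb a n 0 0
  s - PySem.List.pyGetD a (n - 1) 0 - n + d

-- ===== PRECONDITION & SPEC =====
-- Pre_: exactly the inputs where Python A returns (n ≤ len so the loop's arr[i] never
-- raises, and arr[n-1] is a valid Python index, i.e. -len ≤ n-1 < len).
def Pre_func (n : Int) (m : Int) (arr : List Int) : Prop :=
  1 - (arr.length : Int) ≤ n ∧ n ≤ (arr.length : Int)
instance (n : Int) (m : Int) (arr : List Int) : Decidable (Pre_func n m arr) := by
  unfold Pre_func; infer_instance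
def pvWitness_func : Int × Int × List Int := (2, 0, [3, 1, 2])

def Spec_func (n : Int) (m : Int) (arr : List Int) (out : Int) : Prop := out = func_alt n m arr
instance (n : Int) (m : Int) (arr : List Int) (out : Int) : Decidable (Spec_func n m arr out) := by unfold Spec_func; infer_instance

-- ===== CLAIM (what is proved, stated in full; the proofs are below) =====
def Claim_equal_func : Prop := ∀ (n : Int) (m : Int) (arr : List Int), Dom_func n m arr → Pre_func n m arr → Spec_func n m arr (func n m arr)

-- ===== LEMMAS AND PROOFS =====

-- characterisation of the inner while loop
theorem pvScanRun_spec (a : List Int) (n : Int) (v : Int) (j : Int) :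
    (∀ k, j ≤ k → k < pvScanRun a n v j → PySem.List.pyGetD a k 0 = v) ∧
    (j ≤ n → pvScanRun a n v j ≤ n) := by
  fun_induction pvScanRun a n v j with
  | case1 j h ih =>
    refine ⟨?_, fun _ => ih.2 (by omega)⟩
    intro k hk hk'
    rcases eq_or_lt_of_le hk with rfl | hlt
    · exact h.2
    · exact ih.1 k (by omega) hk'
  | case2 j h => exact ⟨fun k hk hk' => absurd hk (by omega), fun h' => h'⟩

-- a fold of the bump step whose read value is constantly v is a bulk increment
theorem foldl_bump (v : Int) (l : List Int) : ∀ d : Int,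
    l.foldl (fun d _ => if d < v then d + 1 else d) d
      = if d < v then d + min (l.length : Int) (v - d) else d := by
  induction l with
  | nil => intro d; simp; intro h; omega
  | cons x t ih =>
    intro d
    simp only [List.foldl_cons, ih, List.length_cons]
    split_ifs <;> push_cast <;> omega

-- the run walk equals A's per-element fold, for ANY array and bounds
theorem pvClimb_eq (a : List Int) (n : Int) : ∀ (i d : Int),
    pvClimb a n i d = (PySem.List.pyRange i n 1).foldl
      (fun d k => if d < PySem.List.pyGetD a k 0 then d + 1 else d) d := by
  intro i d
  fun_induction pvClimb a n i d with
  | case1 i d h v j ih =>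
    have hj1 : i + 1 ≤ j := pvScanRun_ge a n v (i + 1)
    have hspec := pvScanRun_spec a n v (i + 1)
    have hjn : j ≤ n := hspec.2 (by omega)
    rw [PySem.List.pyRange_one_append i j n (by omega) hjn, List.foldl_append]
    rw [PySem.List.pyRange_one_cons (by omega : i < j), List.foldl_cons]
    have hrun : (PySem.List.pyRange (i + 1) j 1).foldl
        (fun d k => if d < PySem.List.pyGetD a k 0 then d + 1 else d)
          (if d < v then d + 1 else d)
        = (PySem.List.pyRange (i + 1) j 1).foldl
            (fun d _ => if d < v then d + 1 else d) (if d < v then d + 1 else d) := by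
      apply PySem.List.foldl_congr_mem
      intro acc x hx
      have hx' := (PySem.List.mem_pyRange_one).1 hx
      rw [hspec.1 x (by omega) (by omega)]
    have hv : PySem.List.pyGetD a i 0 = v := rfl
    simp only [dite_eq_ite] at ih
    rw [hv, hrun, foldl_bump, PySem.List.length_pyRange_one, ih]
    congr 1
    split_ifs <;> push_cast <;> omega
  | case2 i d h =>
    rw [PySem.List.pyRange_one_eq_nil (by omega)]
    rfl

-- ===== VERDICT (by name: the statement is the Claim_ definition above) =====
theorem func_spec : Claim_equal_func := by
  intro n m arr _ _
  unfold Spec_func func func_alt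
  simp only [pvClimb_eq]
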